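-- pv_equiv track=rewrite | github.com/pleasedontddosme/golomb_ruler | golomb_ruler.py | is_golomb_ruler
-- ===== SOURCE A (Python) =====
-- def is_golomb_ruler(markings):
--     """
--     Überprüft, ob die gegebenen Markierungen ein gültiges Golomb-Lineal bilden.
--     """
--     distances = set()
--     for i in range(len(markings)):
--         for j in range(i + 1, len(markings)):
--             distance = markings[j] - markings[i]
--             if distance in distances:
--                 return False
--             distances.add(distance)
--     return True
-- ===== SOURCE B (Python) =====
-- def is_golomb_ruler(markings):
--     # Sort-then-scan: collect every pairwise difference (each mark against the
--     # suffix after it), sort them, and a Golomb ruler is exactly a list whose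
--     # sorted differences contain no equal adjacent pair.
--     diffs = [t - h for k, h in enumerate(markings) for t in markings[k + 1:]]
--     diffs.sort()
--     return all(x != y for x, y in zip(diffs, diffs[1:]))
-- ===== Notes on version B (the rewrite author's own statement) =====
-- stated objective: alternative
-- what changed: B replaces A's nested index loops with incremental set membership and early return by a suffix-pairing pass that collects all differences, then sorts them and checks that no two adjacent sorted values are equal (sort-then-scan duplicate detection instead of hash-set membership).
import Mathlib
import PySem

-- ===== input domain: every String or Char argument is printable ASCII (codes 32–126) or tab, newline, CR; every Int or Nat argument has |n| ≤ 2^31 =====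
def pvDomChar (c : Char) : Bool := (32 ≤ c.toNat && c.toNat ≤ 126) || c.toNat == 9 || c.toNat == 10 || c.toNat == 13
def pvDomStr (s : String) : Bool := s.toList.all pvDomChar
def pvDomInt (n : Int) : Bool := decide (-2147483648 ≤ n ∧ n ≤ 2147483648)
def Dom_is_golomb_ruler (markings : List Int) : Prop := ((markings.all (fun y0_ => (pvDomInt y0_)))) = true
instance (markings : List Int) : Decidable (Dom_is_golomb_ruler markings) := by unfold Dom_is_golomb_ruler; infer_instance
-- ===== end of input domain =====

-- B replaces A's nested index loops with an incremental set and early return by a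
-- pass collecting each mark's differences against its suffix, then sort-then-adjacent-scan duplicate detection.

-- ===== PORT A =====
-- inner 'for j in range(i+1, n)' loop: returns none on 'return False', else the updated set
def golombLoopJ (m : List Int) (i : Int) (js : List Int) (s : PySem.Set Int) :
    Option (PySem.Set Int) :=
  match js with
  | [] => some s
  | j :: rest =>
    let distance := PySem.List.pyGetD m j 0 - PySem.List.pyGetD m i 0
    if PySem.Set.contains s distance then none
    else golombLoopJ m i rest (PySem.Set.add s distance)

-- outer 'for i in range(n)' loop
def golombLoopI (m : List Int) (is_ : List Int) (s : PySem.Set Int) :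
    Option (PySem.Set Int) :=
  match is_ with
  | [] => some s
  | i :: rest =>
    match golombLoopJ m i (PySem.List.pyRange (i + 1) m.length 1) s with
    | none => none
    | some s' => golombLoopI m rest s'

def is_golomb_ruler (markings : List Int) : Bool :=
  match golombLoopI markings (PySem.List.pyRange 0 markings.length 1) PySem.Set.empty with
  | none => false
  | some _ => true

-- ===== PORT B =====
-- Source B's comprehension: each mark h paired with the suffix markings[k+1:] after it,
-- transcribed as structural recursion on the suffix
def collectDiffs (rest : List Int) : List Int :=
  match rest with
  | [] => []
  | h :: rest' => rest'.map (fun t => t - h) ++ collectDiffs rest'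

def is_golomb_ruler_alt (markings : List Int) : Bool :=
  let diffs := PySem.List.sorted (collectDiffs markings) (fun x => x) false
  (diffs.zip diffs.tail).all (fun p => p.1 != p.2)

-- ===== PRECONDITION & SPEC =====
def Spec_is_golomb_ruler (markings : List Int) (out : Bool) : Prop := out = is_golomb_ruler_alt markings
instance (markings : List Int) (out : Bool) : Decidable (Spec_is_golomb_ruler markings out) := by unfold Spec_is_golomb_ruler; infer_instance

-- ===== CLAIM (what is proved, stated in full; the proofs are below) =====
def Claim_equal_is_golomb_ruler : Prop := ∀ (markings : List Int), Dom_is_golomb_ruler markings → Spec_is_golomb_ruler markings (is_golomb_ruler markings)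

-- ===== LEMMAS AND PROOFS =====

-- A's incremental membership scan, flattened over a plain list of values
def checkDistinct (ds : List Int) (s : PySem.Set Int) : Option (PySem.Set Int) :=
  match ds with
  | [] => some s
  | d :: rest => if PySem.Set.contains s d then none else checkDistinct rest (PySem.Set.add s d)

theorem checkDistinct_append (a b : List Int) (s : PySem.Set Int) :
    checkDistinct (a ++ b) s =
      (checkDistinct a s).bind (fun s' => checkDistinct b s') := by
  induction a generalizing s with
  | nil => rfl
  | cons d rest ih =>
    simp only [List.cons_append, checkDistinct]
    split_ifs with h
    · rfl
    · exact ih _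

theorem golombLoopJ_eq (m : List Int) (i : Int) (js : List Int) (s : PySem.Set Int) :
    golombLoopJ m i js s =
      checkDistinct (js.map fun j => PySem.List.pyGetD m j 0 - PySem.List.pyGetD m i 0) s := by
  induction js generalizing s with
  | nil => rfl
  | cons j rest ih =>
    simp only [golombLoopJ, List.map_cons, checkDistinct]
    split_ifs with h
    · rfl
    · exact ih _

theorem golombLoopI_eq (m : List Int) (is_ : List Int) (s : PySem.Set Int) :
    golombLoopI m is_ s =
      checkDistinct (is_.flatMap fun i =>
        (PySem.List.pyRange (i + 1) m.length 1).map fun j =>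
          PySem.List.pyGetD m j 0 - PySem.List.pyGetD m i 0) s := by
  induction is_ generalizing s with
  | nil => rfl
  | cons i rest ih =>
    simp only [golombLoopI, List.flatMap_cons, checkDistinct_append, golombLoopJ_eq]
    cases checkDistinct ((PySem.List.pyRange (i + 1) m.length 1).map fun j =>
        PySem.List.pyGetD m j 0 - PySem.List.pyGetD m i 0) s with
    | none => rfl
    | some s' => exact ih s'

-- the checked scan succeeds iff the values are pairwise distinct and disjoint from s
theorem checkDistinct_isSome (ds : List Int) (s : PySem.Set Int) :
    (checkDistinct ds s).isSome = true ↔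
      ds.Nodup ∧ ∀ d ∈ ds, d ∉ s := by
  induction ds generalizing s with
  | nil => simp [checkDistinct]
  | cons d rest ih =>
    simp only [checkDistinct]
    split_ifs with h
    · simp only [Option.isSome_none, Bool.false_eq_true, false_iff]
      rintro ⟨_, hall⟩
      exact hall d (by simp) ((PySem.Set.contains_iff s d).mp h)
    · rw [ih]
      have hds : d ∉ s := fun hm => h ((PySem.Set.contains_iff s d).mpr hm)
      constructor
      · rintro ⟨hnd, hall⟩
        have hmem : d ∉ rest := by
          intro hd
          exact hall d hd ((PySem.Set.mem_add s d d).mpr (Or.inr rfl))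
        refine ⟨List.nodup_cons.mpr ⟨hmem, hnd⟩, ?_⟩
        intro e he
        rcases List.mem_cons.mp he with rfl | he'
        · exact hds
        · intro hes
          exact hall e he' ((PySem.Set.mem_add s d e).mpr (Or.inl hes))
      · rintro ⟨hnd, hall⟩
        rcases List.nodup_cons.mp hnd with ⟨hdm, hnd'⟩
        refine ⟨hnd', ?_⟩
        intro e he hea
        rcases (PySem.Set.mem_add s d e).mp hea with hes | rfl
        · exact hall e (List.mem_cons_of_mem _ he) hes
        · exact hdm he

-- inner index map at a fixed i as a map over the suffix
theorem inner_eq (m : List Int) (i : Int) (hi : 0 ≤ i) :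
    ((PySem.List.pyRange (i + 1) (m.length : Int) 1).map fun j =>
        PySem.List.pyGetD m j 0 - PySem.List.pyGetD m i 0) =
      (m.drop (i + 1).toNat).map (fun t => t - PySem.List.pyGetD m i 0) := by
  have hcomp : (fun j => PySem.List.pyGetD m j 0 - PySem.List.pyGetD m i 0)
      = (fun t => t - PySem.List.pyGetD m i 0) ∘ (fun j => PySem.List.pyGetD m j 0) := rfl
  rw [hcomp, ← List.map_map]
  congr 1
  exact PySem.List.map_pyGetD_pyRange' m 0 (show (0 : Int) ≤ i + 1 by omega)

-- suffix/index form equals collectDiffs, by structural induction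
theorem flat_range_eq_collect (m : List Int) :
    ((List.range m.length).flatMap fun k =>
      (m.drop (k + 1)).map fun t => t - m.getD k 0) = collectDiffs m := by
  induction m with
  | nil => simp [collectDiffs]
  | cons h rest ih =>
    rw [List.length_cons, List.range_succ_eq_map, List.flatMap_cons, List.flatMap_map]
    simp only [Nat.succ_eq_add_one, List.drop_succ_cons, List.getD_cons_succ,
      List.getD_cons_zero, List.drop_zero]
    rw [ih]
    rfl

-- the differences in index form equal the head/tail form collectDiffs
theorem dsA_eq_collectDiffs (m : List Int) :
    ((PySem.List.pyRange 0 (m.length : Int) 1).flatMap fun i =>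
      (PySem.List.pyRange (i + 1) (m.length : Int) 1).map fun j =>
        PySem.List.pyGetD m j 0 - PySem.List.pyGetD m i 0) = collectDiffs m := by
  rw [PySem.List.pyRange_zero_natCast m.length, List.flatMap_map]
  have hfun : ∀ k : Nat,
      ((PySem.List.pyRange ((k : Int) + 1) (m.length : Int) 1).map fun j =>
        PySem.List.pyGetD m j 0 - PySem.List.pyGetD m (k : Int) 0) =
      (m.drop (k + 1)).map fun t => t - m.getD k 0 := by
    intro k
    rw [inner_eq m (k : Int) (by positivity)]
    have h1 : ((k : Int) + 1).toNat = k + 1 := by omega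
    have h2 : PySem.List.pyGetD m (k : Int) 0 = m.getD k 0 := PySem.List.pyGetD_natCast m k 0
    rw [h1, h2]
  simp only [hfun]
  exact flat_range_eq_collect m

-- adjacent-distinct on a ≤-sorted list is exactly Nodup
theorem adj_all_iff_nodup (l : List Int) (hp : l.Pairwise (· ≤ ·)) :
    ((l.zip l.tail).all (fun p => p.1 != p.2) = true) ↔ l.Nodup := by
  induction l with
  | nil => simp
  | cons a l ih =>
    cases l with
    | nil => simp
    | cons b t =>
      have hab : a ≤ b := (List.pairwise_cons.mp hp).1 b (by simp)
      have hpt : (b :: t).Pairwise (· ≤ ·) := (List.pairwise_cons.mp hp).2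
      simp only [List.zip_cons_cons, List.tail_cons, List.all_cons, Bool.and_eq_true]
      rw [show ((b :: t).zip t) = ((b :: t).zip (b :: t).tail) from rfl, ih hpt]
      constructor
      · rintro ⟨hne, hnd⟩
        have hlt : a < b := lt_of_le_of_ne hab (by simpa using hne)
        refine List.nodup_cons.mpr ⟨?_, hnd⟩
        intro hmem
        rcases List.mem_cons.mp hmem with rfl | ht
        · exact absurd rfl (ne_of_lt hlt)
        · have hbx : b ≤ a := (List.pairwise_cons.mp hpt).1 a ht
          exact absurd rfl (ne_of_lt (lt_of_lt_of_le hlt hbx))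
      · intro hnd
        rcases List.nodup_cons.mp hnd with ⟨hmem, hnd'⟩
        exact ⟨by simpa using fun h : a = b => hmem (h ▸ List.mem_cons_self), hnd'⟩

-- ===== VERDICT (by name: the statement is the Claim_ definition above) =====
theorem is_golomb_ruler_spec : Claim_equal_is_golomb_ruler := by
  intro m _
  unfold Spec_is_golomb_ruler is_golomb_ruler is_golomb_ruler_alt
  rw [golombLoopI_eq, dsA_eq_collectDiffs]
  set ds := collectDiffs m with hds
  set l := PySem.List.sorted ds (fun x => x) false with hl
  show (match checkDistinct ds PySem.Set.empty with | none => false | some _ => true)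
      = ((l.zip l.tail).all fun p => p.1 != p.2)
  have hperm : l.Perm ds := PySem.List.sorted_perm ds (fun x => x) false
  have hpair : l.Pairwise (· ≤ ·) := by simpa using PySem.List.sorted_pairwise ds (fun x => x)
  have hadj := adj_all_iff_nodup l hpair
  have hiff := checkDistinct_isSome ds PySem.Set.empty
  have hemp : ∀ d ∈ ds, d ∉ (PySem.Set.empty : PySem.Set Int) := by
    intro d _ hc
    simp [PySem.Set.empty] at hc
  cases hcd : checkDistinct ds PySem.Set.empty with
  | none =>
    rw [hcd] at hiff
    simp only [Option.isSome_none, Bool.false_eq_true, false_iff] at hiff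
    have hnod : ¬ l.Nodup := fun h => hiff ⟨hperm.nodup_iff.mp h, hemp⟩
    cases hall : ((l.zip l.tail).all fun p => p.1 != p.2) with
    | false => rfl
    | true => exact (hnod (hadj.mp hall)).elim
  | some s' =>
    rw [hcd] at hiff
    simp only [Option.isSome_some, true_iff] at hiff
    exact (hadj.mpr (hperm.nodup_iff.mpr hiff.1)).symm
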